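-- pv_equiv track=rewrite | github.com/pypi-data/pypi-mirror-359 | packages/tali-cli/tali_cli-0.2.4.tar.gz/tali_cli-0.2.4/tali/parser/editor.py | process_prefix_sharing_lines
-- ===== SOURCE A (Python) =====
-- from typing import List
--
-- def _min_indent(lines):
--     indents = [len(line) - len(line.lstrip()) for line in lines if line.strip()]
--     return min(indents) if indents else 0
--
-- def _process_block(block: List[str]) -> List[str]:
--     if not block:
--         return []
--     prefix_line, suffix_lines = block[0], block[1:]
--     if not suffix_lines:
--         return [prefix_line.rstrip()]
--     suffix_lines = process_prefix_sharing_lines(suffix_lines)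
--     prefix = prefix_line.rstrip()
--     return [f"{prefix} {suffix}" for suffix in suffix_lines]
--
-- def process_prefix_sharing_lines(lines: List[str]) -> List[str]:
--     if not lines:
--         return []
--     indent = _min_indent(lines)
--     lines = [line[indent:] for line in lines if line.strip()]
--     block_indices = [
--         i for i, line in enumerate(lines) if not line.startswith(" ")
--     ]
--     processed = []
--     for start, end in zip([0] + block_indices, block_indices + [len(lines)]):
--         block = lines[start:end]
--         processed += _process_block(block)
--     return processed
-- ===== SOURCE B (Python) =====
-- # Alternative implementation: precompute each line's indent once, then emit output
-- # lines directly with a prefix accumulator, walking the item array by index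
-- # (no repeated dedent-slicing, list copying or result re-mapping).
--
-- def _emit(m, items, lo, hi, prefix):
--     # emits the lines of items[lo:hi] (whose min indent is m), each finished
--     # output line prefixed by `prefix`
--     out = []
--     i = lo
--     while i < hi:
--         # scan the block headed by items[i]: following lines belong to it while
--         # they are indented past column m with a plain space there; track the
--         # min indent of the block body while scanning
--         j = i + 1
--         mn = None
--         while j < hi and items[j][0] > m and items[j][1][m] == " ":
--             if mn is None or items[j][0] < mn:
--                 mn = items[j][0]
--             j += 1
--         head = items[i][1]
--         p = prefix + head[m:].rstrip()
--         if j == i + 1: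
--             out.append(p)
--         else:
--             out += _emit(mn, items, i + 1, j, p + " ")
--         i = j
--     return out
--
-- def process_prefix_sharing_lines(lines):
--     items = [(len(l) - len(l.lstrip()), l) for l in lines if l.strip()]
--     if not items:
--         return []
--     return _emit(min(n for n, _ in items), items, 0, len(items), "")
-- ===== Notes on version B (the rewrite author's own statement) =====
-- stated objective: alternative
-- what changed: Replaces A's recursive dedent-reslice-and-remap scheme (each level re-slices every line, recomputes the min indent on the copies, splits blocks via an index/zip list and maps the whole recursive result to prepend the prefix) by one precomputation of each line's indent followed by a top-down index walk that splits blocks with a single scan (tracking the block's min indent while scanning) and emits finished output lines directly through a prefix accumulator.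
import Mathlib
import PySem

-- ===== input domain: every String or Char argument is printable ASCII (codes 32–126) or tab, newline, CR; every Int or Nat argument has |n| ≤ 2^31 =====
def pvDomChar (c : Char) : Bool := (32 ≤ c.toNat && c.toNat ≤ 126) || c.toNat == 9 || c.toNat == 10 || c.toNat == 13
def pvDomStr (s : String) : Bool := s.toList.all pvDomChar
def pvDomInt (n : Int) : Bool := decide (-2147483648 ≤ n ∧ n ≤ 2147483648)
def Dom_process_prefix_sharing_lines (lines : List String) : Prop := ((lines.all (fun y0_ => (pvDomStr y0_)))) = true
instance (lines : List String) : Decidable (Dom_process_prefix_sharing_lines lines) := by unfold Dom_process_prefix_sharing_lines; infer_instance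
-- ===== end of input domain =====

-- B replaces A's per-level dedent-and-remap recursion by one precomputed indent per line
-- and a prefix-accumulating pass that emits output lines directly (objective: alternative).

-- ===== PORT A =====
-- len(line) - len(line.lstrip())
def pvWs (l : String) : Int := PySem.Str.len l - PySem.Str.len (PySem.Str.lstrip l)

-- Python truthiness of line.strip()
def pvNb (l : String) : Bool := PySem.Str.strip l != ""

-- _min_indent: min(indents) if indents else 0
def pvMinIndent (lines : List String) : Int :=
  (PySem.List.min? ((lines.filter pvNb).map pvWs) (fun x => x)).getD 0

-- [i for i, line in enumerate(lines) if not line.startswith(" ")]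
def pvIdxs (xs : List String) : List Int :=
  (PySem.List.enumerate xs).filterMap
    (fun p => if PySem.Str.startswith p.2 " " then none else some p.1)

mutual
-- the 'for start, end in zip(...)' loop accumulating 'processed'
def pvProcBlocks (src : List String) (pairs : List (Int × Int)) : List String :=
  match pairs with
  | [] => []
  | (s, e) :: rest =>
    pvProcessBlock (PySem.List.slice src (some s) (some e)) ++ pvProcBlocks src rest
termination_by (src.length, pairs.length, 0)
decreasing_by
  · have hle : (PySem.List.slice src (some s) (some e)).length ≤ src.length := by
      rw [PySem.List.length_slice]
      have h1 := PySem.List.clampIdx_le src.length e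
      omega
    rcases lt_or_eq_of_le hle with h | h
    · exact Prod.Lex.left _ _ h
    · rw [h]; exact Prod.Lex.right _ (Prod.Lex.left _ _ (Nat.lt_succ_of_le (Nat.zero_le _)))
  · exact Prod.Lex.right _ (Prod.Lex.left _ _ (Nat.lt_succ_self _))

-- _process_block
def pvProcessBlock (block : List String) : List String :=
  match block with
  | [] => []
  | prefixLine :: suffixLines =>
    match suffixLines with
    | [] => [PySem.Str.rstrip prefixLine]
    | s1 :: srest =>
      let suffix' := process_prefix_sharing_lines (s1 :: srest)
      let pre := PySem.Str.rstrip prefixLine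
      suffix'.map (fun s => pre ++ " " ++ s)
termination_by (block.length, 0, 1)
decreasing_by
  simp only [List.length_cons]
  exact Prod.Lex.right _ (Prod.Lex.right _ (Nat.lt_succ_self 0))

def process_prefix_sharing_lines (lines : List String) : List String :=
  match lines with
  | [] => []
  | l1 :: lrest =>
    let indent := pvMinIndent (l1 :: lrest)
    let lines' := ((l1 :: lrest).filter pvNb).map (fun l => PySem.Str.slice l (some indent) none)
    let idxs := pvIdxs lines'
    pvProcBlocks lines' (List.zip ((0 : Int) :: idxs) (idxs ++ [PySem.List.len lines']))
termination_by (lines.length + 1, 0, 0)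
decreasing_by
  apply Prod.Lex.left
  have : (((l1 :: lrest).filter pvNb).map
      (fun l => PySem.Str.slice l (some (pvMinIndent (l1 :: lrest))) none)).length ≤ (l1 :: lrest).length := by
    rw [List.length_map]; exact List.length_filter_le _ _
  omega
end

-- ===== PORT B =====
-- continuation test of the inner while: items[k][0] > m and items[k][1][m] == " "
def pvCont (m : Int) (it : Int × String) : Bool :=
  decide (m < it.1) && (PySem.Str.pyGet? it.2 m == some ' ')

-- min(n for n, _ in items); only applied to nonempty lists, so the default is never used
def pvMinFst (items : List (Int × String)) : Int :=
  (PySem.List.min? (items.map Prod.fst) (fun x => x)).getD 0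

-- _emit (the while loop is the structural recursion; _take_block is the takeWhile/dropWhile split)
def pvEmit (m : Int) (items : List (Int × String)) (pre : String) : List String :=
  match items with
  | [] => []
  | it :: rest =>
    let tl := rest.takeWhile (pvCont m)
    let rest' := rest.dropWhile (pvCont m)
    let p := pre ++ PySem.Str.rstrip (PySem.Str.slice it.2 (some m) none)
    (match tl with
     | [] => [p]
     | _ :: _ => pvEmit (pvMinFst tl) tl (p ++ " ")) ++ pvEmit m rest' pre
termination_by items.length
decreasing_by
  · have := List.Sublist.length_le (List.takeWhile_sublist (l := rest) (p := pvCont m))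
    simp only [List.length_cons]; omega
  · have := List.length_dropWhile_le (pvCont m) rest
    simp only [List.length_cons]; omega

def process_prefix_sharing_lines_alt (lines : List String) : List String :=
  let items := (lines.filter pvNb).map (fun l => (pvWs l, l))
  match items with
  | [] => []
  | _ :: _ => pvEmit (pvMinFst items) items ""

-- ===== PRECONDITION & SPEC =====
def Spec_process_prefix_sharing_lines (lines : List String) (out : List String) : Prop := out = process_prefix_sharing_lines_alt lines
instance (lines : List String) (out : List String) : Decidable (Spec_process_prefix_sharing_lines lines out) := by unfold Spec_process_prefix_sharing_lines; infer_instance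

-- ===== CLAIM (what is proved, stated in full; the proofs are below) =====
def Claim_equal_process_prefix_sharing_lines : Prop := ∀ (lines : List String), Dom_process_prefix_sharing_lines lines → Spec_process_prefix_sharing_lines lines (process_prefix_sharing_lines lines)

-- ===== LEMMAS AND PROOFS =====

-- abbreviation used throughout the proofs: the Python slice line[k:]
def pvDd (k : Int) (l : String) : String := PySem.Str.slice l (some k) none

-- boundary test on a dedented line
def pvBnd (l : String) : Bool := !(PySem.Str.startswith l " ")

-- structural form of the boundary-index list
def pvBIdxs : List String → List Int
  | [] => []
  | x :: r => (if pvBnd x then [(0 : Int)] else []) ++ (pvBIdxs r).map (· + 1)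

-- head-wise form of A's block splitting
def pvBlockRec : List String → List String
  | [] => []
  | x :: r =>
    pvProcessBlock (x :: r.takeWhile (fun l => !pvBnd l)) ++
      pvBlockRec (r.dropWhile (fun l => !pvBnd l))
termination_by xs => xs.length
decreasing_by
  have := List.length_dropWhile_le (fun l => !pvBnd l) r
  simp only [List.length_cons]; omega

-- ---- small facts ----

lemma pvWs_eq (l : String) :
    pvWs l = ((l.toList.takeWhile PySem.Chars.isspace).length : Int) := by
  have h := congrArg List.length
    (List.takeWhile_append_dropWhile (p := PySem.Chars.isspace) (l := l.toList))
  simp only [List.length_append] at h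
  simp only [pvWs, PySem.Str.len_eq, PySem.Str.toList_lstrip, PySem.Chars.lstrip]
  omega

lemma pvNb_iff (l : String) :
    pvNb l = true ↔ ¬ (∀ c ∈ l.toList, PySem.Chars.isspace c = true) := by
  unfold pvNb
  rw [bne_iff_ne, ne_eq]
  have hlist : (PySem.Str.strip l = "") ↔ ((PySem.Str.strip l).toList = ([] : List Char)) := by
    rw [← String.toList_inj]; simp
  rw [hlist, PySem.Str.toList_strip]
  simp only [PySem.Chars.strip, PySem.Chars.rstrip, PySem.Chars.lstrip,
    List.reverse_eq_nil_iff, List.dropWhile_eq_nil_iff, List.mem_reverse]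
  constructor
  · intro h hall
    exact h (fun x hx => hall x ((List.dropWhile_sublist _).subset hx))
  · intro h hcon
    apply h; intro c hc
    have hc' : c ∈ l.toList.takeWhile PySem.Chars.isspace ++
        l.toList.dropWhile PySem.Chars.isspace := by
      rw [List.takeWhile_append_dropWhile]; exact hc
    rcases List.mem_append.mp hc' with h1 | h2
    · exact List.mem_takeWhile_imp h1
    · exact hcon c h2

lemma pvWs_lt_len (l : String) (h : pvNb l = true) :
    (l.toList.takeWhile PySem.Chars.isspace).length < l.toList.length := by
  have hsub := List.takeWhile_sublist (l := l.toList) (p := PySem.Chars.isspace)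
  rcases lt_or_eq_of_le hsub.length_le with hlt | heq
  · exact hlt
  · exfalso
    apply (pvNb_iff l).mp h
    intro c hc
    exact List.mem_takeWhile_imp (x := c) (by rw [hsub.eq_of_length heq]; exact hc)

lemma pvDd_toList (k : Int) (hk : 0 ≤ k) (l : String) :
    (pvDd k l).toList = l.toList.drop k.toNat := by
  simp only [pvDd, PySem.Str.toList_slice, PySem.Chars.slice]
  exact PySem.List.slice_from _ hk

lemma pvNb_pvDd (k : Int) (l : String) (hk : 0 ≤ k) (h : pvNb l = true)
    (hkw : k ≤ pvWs l) : pvNb (pvDd k l) = true := by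
  rw [pvNb_iff, pvDd_toList k hk]
  intro hall
  apply (pvNb_iff l).mp h
  intro c hc
  have hc' : c ∈ l.toList.take k.toNat ++ l.toList.drop k.toNat := by
    rw [List.take_append_drop]; exact hc
  rcases List.mem_append.mp hc' with h1 | h2
  · -- c sits inside the leading-whitespace prefix
    have hkw' : k.toNat ≤ (l.toList.takeWhile PySem.Chars.isspace).length := by
      rw [pvWs_eq] at hkw; omega
    rw [← List.takeWhile_append_dropWhile (p := PySem.Chars.isspace) (l := l.toList),
      List.take_append_of_le_length hkw'] at h1
    exact List.mem_takeWhile_imp ((List.take_sublist _ _).subset h1)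
  · exact hall c h2

lemma pvWs_pvDd (k : Int) (l : String) (hk : 0 ≤ k) (_h : pvNb l = true)
    (hkw : k ≤ pvWs l) : pvWs (pvDd k l) = pvWs l - k := by
  have hkw' : k.toNat ≤ (l.toList.takeWhile PySem.Chars.isspace).length := by
    rw [pvWs_eq] at hkw; omega
  have hall : List.takeWhile PySem.Chars.isspace
      ((l.toList.takeWhile PySem.Chars.isspace).drop k.toNat)
      = (l.toList.takeWhile PySem.Chars.isspace).drop k.toNat := by
    rw [List.takeWhile_eq_self_iff]
    intro x hx
    exact List.mem_takeWhile_imp ((List.drop_sublist _ _).subset hx)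
  have hnil : (l.toList.dropWhile PySem.Chars.isspace).takeWhile PySem.Chars.isspace = [] := by
    rw [List.takeWhile_eq_nil_iff]
    intro hl
    simpa using List.dropWhile_get_zero_not PySem.Chars.isspace l.toList hl
  have hdd : (pvDd k l).toList.takeWhile PySem.Chars.isspace
      = (l.toList.takeWhile PySem.Chars.isspace).drop k.toNat := by
    rw [pvDd_toList k hk]
    conv_lhs => rw [← List.takeWhile_append_dropWhile (p := PySem.Chars.isspace) (l := l.toList)]
    rw [List.drop_append_of_le_length hkw', List.takeWhile_append, hall, hnil, List.append_nil,
      if_pos rfl]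
  rw [pvWs_eq, hdd, List.length_drop, pvWs_eq]
  omega

lemma pvDd_pvDd (a b : Int) (ha : 0 ≤ a) (hb : 0 ≤ b) (l : String) :
    pvDd b (pvDd a l) = pvDd (a + b) l := by
  rw [← String.toList_inj, pvDd_toList b hb, pvDd_toList a ha, pvDd_toList (a + b) (by omega),
    List.drop_drop]
  congr 1
  omega

lemma pvDd_zero (l : String) : pvDd 0 l = l := by
  rw [← String.toList_inj, pvDd_toList 0 le_rfl]
  simp

lemma pvCont_iff (M : Int) (l : String) (hM : 0 ≤ M) (h : pvNb l = true)
    (hMw : M ≤ pvWs l) :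
    pvCont M (pvWs l, l) = !pvBnd (pvDd M l) := by
  have hwlt := pvWs_lt_len l h
  have hMn : M.toNat < l.toList.length := by rw [pvWs_eq] at hMw; omega
  unfold pvCont pvBnd
  rw [Bool.not_not, PySem.Str.startswith_eq, pvDd_toList M hM]
  have hsp : (" " : String).toList = [' '] := by decide
  rw [hsp, PySem.Chars.startswith, List.drop_eq_getElem_cons hMn]
  have hpref : List.isPrefixOf [' '] (l.toList[M.toNat] :: l.toList.drop (M.toNat + 1))
      = (' ' == l.toList[M.toNat]) := by
    simp [List.isPrefixOf]
  rw [hpref]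
  have hget : PySem.Str.pyGet? l M = some l.toList[M.toNat] := by
    have hbr := PySem.Str.pyGet?_natCast (s := l) (n := M.toNat)
    rw [List.getElem?_eq_getElem hMn, Int.toNat_of_nonneg hM] at hbr
    exact hbr
  rw [hget]
  rcases lt_or_eq_of_le hMw with hlt | heq
  · simp only [hlt, decide_true, Bool.true_and]
    simp [Bool.beq_comm]
  · have hfalse : decide (M < pvWs l) = false := by simp [heq]
    rw [hfalse, Bool.false_and]
    -- the char at the indent column is the first non-whitespace char
    have hTlen : (l.toList.takeWhile PySem.Chars.isspace).length = M.toNat := by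
      rw [pvWs_eq] at heq; omega
    have hD : List.drop M.toNat l.toList = l.toList.dropWhile PySem.Chars.isspace := by
      have hdl := List.drop_left (l₁ := l.toList.takeWhile PySem.Chars.isspace)
        (l₂ := l.toList.dropWhile PySem.Chars.isspace)
      rw [List.takeWhile_append_dropWhile, hTlen] at hdl
      exact hdl
    have hlD : 0 < (l.toList.dropWhile PySem.Chars.isspace).length := by
      have := congrArg List.length hD
      simp only [List.length_drop] at this
      omega
    have hns := List.dropWhile_get_zero_not PySem.Chars.isspace l.toList hlD
    have hcons := List.drop_eq_getElem_cons hMn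
    rw [hD] at hcons
    simp only [List.get_eq_getElem, hcons, List.getElem_cons_zero] at hns
    have : (' ' == l.toList[M.toNat]) = false := by
      rw [beq_eq_false_iff_ne]
      intro hsp'
      rw [← hsp'] at hns
      exact absurd hns (by decide)
    rw [this]

-- ---- min facts ----

lemma pvMin?_eq (xs : List Int) (M : Int) (hmem : M ∈ xs) (hmin : ∀ y ∈ xs, M ≤ y) :
    PySem.List.min? xs (fun x => x) = some M := by
  cases hx : PySem.List.min? xs (fun x => x) with
  | none =>
    rw [PySem.List.min?_eq_none_iff] at hx
    rw [hx] at hmem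
    cases hmem
  | some m =>
    have h1 : M ≤ m := hmin m (PySem.List.min?_mem hx)
    have h2 : m ≤ M := PySem.List.min?_isMin hx M hmem
    rw [le_antisymm h2 h1]

lemma pvMinIndent_dd (lines : List String) (d : Int) (hd : 0 ≤ d) (M : Int)
    (_hne : lines ≠ [])
    (hall : ∀ l ∈ lines, pvNb l = true ∧ d ≤ pvWs l)
    (hMmem : M ∈ lines.map pvWs) (hMmin : ∀ l ∈ lines, M ≤ pvWs l) :
    pvMinIndent (lines.map (pvDd d)) = M - d := by
  unfold pvMinIndent
  have hfil : (lines.map (pvDd d)).filter pvNb = lines.map (pvDd d) := by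
    rw [List.filter_eq_self]
    intro x hx
    obtain ⟨l, hl, rfl⟩ := List.mem_map.mp hx
    exact pvNb_pvDd d l hd (hall l hl).1 (hall l hl).2
  rw [hfil, List.map_map]
  have hmap : lines.map (pvWs ∘ pvDd d) = lines.map (fun l => pvWs l - d) := by
    apply List.map_congr_left
    intro l hl
    exact pvWs_pvDd d l hd (hall l hl).1 (hall l hl).2
  rw [hmap]
  rw [pvMin?_eq _ (M - d) ?_ ?_]
  · rfl
  · obtain ⟨l, hl, hlM⟩ := List.mem_map.mp hMmem
    exact List.mem_map.mpr ⟨l, hl, by rw [hlM]⟩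
  · intro y hy
    obtain ⟨l, hl, rfl⟩ := List.mem_map.mp hy
    have := hMmin l hl
    omega

lemma pvMinFst_eq (lines : List String) (M : Int)
    (hMmem : M ∈ lines.map pvWs) (hMmin : ∀ l ∈ lines, M ≤ pvWs l) :
    pvMinFst (lines.map (fun l => (pvWs l, l))) = M := by
  unfold pvMinFst
  rw [List.map_map]
  have hmap : lines.map (Prod.fst ∘ fun l => (pvWs l, l)) = lines.map pvWs := rfl
  rw [hmap, pvMin?_eq _ M hMmem (by
    intro y hy
    obtain ⟨l, hl, rfl⟩ := List.mem_map.mp hy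
    exact hMmin l hl)]
  rfl

-- ---- A-side: canonical pairs compute the head-wise block split ----

lemma pvIdxs_enum (xs : List String) : ∀ s : Int,
    (PySem.List.enumerate xs s).filterMap
        (fun p => if PySem.Str.startswith p.2 " " then none else some p.1)
      = (pvBIdxs xs).map (· + s) := by
  induction xs with
  | nil => intro s; rw [PySem.List.enumerate.eq_def]; simp [pvBIdxs]
  | cons x r ih =>
    intro s
    rw [PySem.List.enumerate.eq_def]
    simp only [List.filterMap_cons]
    have hmm : ((pvBIdxs r).map (· + (1 : Int))).map (· + s) = (pvBIdxs r).map (· + (s + 1)) := by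
      rw [List.map_map]
      apply List.map_congr_left
      intro i _
      simp only [Function.comp_apply]
      omega
    cases hx : PySem.Str.startswith x " " with
    | true =>
      have hx' : PySem.Chars.startswith x.toList [' '] = true := by
        rw [PySem.Str.startswith_eq, show (" " : String).toList = [' '] from by decide] at hx
        exact hx
      rw [ih (s + 1)]
      simp [pvBIdxs, pvBnd, hx', hmm]
    | false =>
      have hx' : PySem.Chars.startswith x.toList [' '] = false := by
        rw [PySem.Str.startswith_eq, show (" " : String).toList = [' '] from by decide] at hx
        exact hx
      simp only [Bool.false_eq_true, if_false]
      rw [ih (s + 1)]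
      simp [pvBIdxs, pvBnd, hx', hmm]

lemma pvIdxs_eq (xs : List String) : pvIdxs xs = pvBIdxs xs := by
  unfold pvIdxs
  rw [pvIdxs_enum xs 0]
  have : (pvBIdxs xs).map (· + (0 : Int)) = (pvBIdxs xs).map id := by
    apply List.map_congr_left
    intro i _
    simp
  rw [this, List.map_id]

lemma pvBIdxs_nonneg (xs : List String) : ∀ i ∈ pvBIdxs xs, 0 ≤ i := by
  induction xs with
  | nil => simp [pvBIdxs]
  | cons x r ih =>
    intro i hi
    simp only [pvBIdxs, List.mem_append, List.mem_map] at hi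
    rcases hi with h1 | ⟨j, hj, rfl⟩
    · split at h1 <;> simp_all
    · have := ih j hj
      omega

lemma pvSlice_zero_zero (xs : List String) :
    PySem.List.slice xs (some 0) (some 0) = [] := by
  rw [PySem.List.slice_toNat xs le_rfl le_rfl]
  simp

lemma pvProcBlocks_shift (blk r : List String) (ps : List (Int × Int))
    (h : ∀ p ∈ ps, 0 ≤ p.1 ∧ 0 ≤ p.2) :
    pvProcBlocks (blk ++ r)
        (ps.map (fun p => (p.1 + (blk.length : Int), p.2 + (blk.length : Int)))) =
      pvProcBlocks r ps := by
  induction ps with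
  | nil => simp [pvProcBlocks]
  | cons q rest ih =>
    obtain ⟨s, e⟩ := q
    have hs : (0 : Int) ≤ s := (h (s, e) (List.mem_cons_self)).1
    have he : (0 : Int) ≤ e := (h (s, e) (List.mem_cons_self)).2
    have h1 : (s + (blk.length : Int)).toNat = blk.length + s.toNat := by omega
    have h2 : (e + (blk.length : Int)).toNat - (s + (blk.length : Int)).toNat
        = e.toNat - s.toNat := by omega
    have hslice : PySem.List.slice (blk ++ r) (some (s + (blk.length : Int)))
        (some (e + (blk.length : Int))) = PySem.List.slice r (some s) (some e) := by
      rw [PySem.List.slice_toNat _ (by omega) (by omega), PySem.List.slice_toNat _ hs he]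
      rw [h2, h1, ← List.drop_drop, List.drop_left]
    simp only [List.map_cons]
    rw [pvProcBlocks, pvProcBlocks]
    rw [ih (fun p hp => h p (List.mem_cons_of_mem _ hp)), hslice]

lemma pvMap_add_add (m : List Int) (a b : Int) :
    (m.map (· + a)).map (· + b) = m.map (· + (a + b)) := by
  rw [List.map_map]
  apply List.map_congr_left
  intro i _
  simp only [Function.comp_apply]
  omega

lemma pvTakeWhile_congr {α : Type} (p q : α → Bool) (l : List α)
    (h : ∀ x ∈ l, p x = q x) : l.takeWhile p = l.takeWhile q := by
  induction l with
  | nil => rfl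
  | cons x t ih =>
    simp only [List.takeWhile_cons, h x List.mem_cons_self]
    rw [ih (fun y hy => h y (List.mem_cons_of_mem _ hy))]

lemma pvDropWhile_congr {α : Type} (p q : α → Bool) (l : List α)
    (h : ∀ x ∈ l, p x = q x) : l.dropWhile p = l.dropWhile q := by
  induction l with
  | nil => rfl
  | cons x t ih =>
    simp only [List.dropWhile_cons, h x List.mem_cons_self]
    rw [ih (fun y hy => h y (List.mem_cons_of_mem _ hy))]

lemma pvCharAux (n : Nat)
    (IH : ∀ ys : List String, ys.length ≤ n →
      pvProcBlocks ys (List.zip ((0 : Int) :: pvBIdxs ys) (pvBIdxs ys ++ [(ys.length : Int)]))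
        = pvBlockRec ys) :
    ∀ (r blk : List String), r.length ≤ n →
      pvProcBlocks (blk ++ r)
          (List.zip ((0 : Int) :: (pvBIdxs r).map (· + (blk.length : Int)))
            ((pvBIdxs r).map (· + (blk.length : Int)) ++ [((blk.length : Int) + r.length)])) =
        pvProcessBlock (blk ++ r.takeWhile (fun l => !pvBnd l)) ++
          pvBlockRec (r.dropWhile (fun l => !pvBnd l)) := by
  intro r
  induction r with
  | nil =>
    intro blk _
    simp only [pvBIdxs, List.map_nil, List.nil_append, List.length_nil, Nat.cast_zero,
      add_zero, List.takeWhile_nil, List.dropWhile_nil, List.append_nil, List.zip_cons_cons,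
      List.zip_nil_left]
    rw [pvProcBlocks, pvProcBlocks]
    have hsl : PySem.List.slice blk (some 0) (some (blk.length : Int)) = blk := by
      rw [PySem.List.slice_toNat _ le_rfl (by omega)]
      simp
    rw [hsl]
    simp [pvBlockRec]
  | cons y r' ihr =>
    intro blk hlen
    have hlen' : r'.length ≤ n := by
      simp only [List.length_cons] at hlen
      omega
    cases hy : pvBnd y with
    | true =>
      -- y is a boundary: the pending block closes here
      have hb : pvBIdxs (y :: r') = (0 : Int) :: (pvBIdxs r').map (· + 1) := by
        simp [pvBIdxs, hy]
      rw [hb]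
      have hfst : ((0 : Int) :: (pvBIdxs r').map (· + 1)).map (· + (blk.length : Int))
          = (blk.length : Int) :: ((pvBIdxs r').map (· + 1)).map (· + (blk.length : Int)) := by
        simp
      rw [hfst]
      simp only [List.zip_cons_cons, List.cons_append]
      rw [pvProcBlocks]
      have hsl : PySem.List.slice (blk ++ y :: r') (some 0) (some (blk.length : Int)) = blk := by
        rw [PySem.List.slice_toNat _ le_rfl (by omega)]
        simp
      rw [hsl]
      -- the remaining pairs are the canonical pairs of (y :: r'), shifted by blk.length
      have hshift : List.zip ((blk.length : Int) :: ((pvBIdxs r').map (· + 1)).map (· + (blk.length : Int)))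
            (((pvBIdxs r').map (· + 1)).map (· + (blk.length : Int)) ++ [((blk.length : Int) + ((y :: r').length : Int))])
          = (List.zip ((0 : Int) :: (pvBIdxs r').map (· + 1))
              ((pvBIdxs r').map (· + 1) ++ [(((y :: r').length : Int))])).map
            (fun p => (p.1 + (blk.length : Int), p.2 + (blk.length : Int))) := by
      -- zip of shifted lists is the shifted zip
        have h1 : ((blk.length : Int) :: ((pvBIdxs r').map (· + 1)).map (· + (blk.length : Int)))
            = ((0 : Int) :: (pvBIdxs r').map (· + 1)).map (· + (blk.length : Int)) := by
          simp
        have h2 : (((pvBIdxs r').map (· + 1)).map (· + (blk.length : Int)) ++ [((blk.length : Int) + ((y :: r').length : Int))])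
            = ((pvBIdxs r').map (· + 1) ++ [(((y :: r').length : Int))]).map (· + (blk.length : Int)) := by
          simp only [List.map_append, List.map_cons, List.map_nil]
          congr 2
          omega
        rw [h1, h2, List.zip_map]
        apply List.map_congr_left
        intro q _
        rfl
      rw [hshift, pvProcBlocks_shift]
      · -- the shifted remainder computes pvBlockRec (y :: r') via the outer IH
        have hcanon := IH (y :: r') hlen
        rw [hb] at hcanon
        simp only [List.cons_append, List.zip_cons_cons] at hcanon
        rw [pvProcBlocks, pvSlice_zero_zero] at hcanon
        rw [pvProcessBlock] at hcanon
        simp only [List.nil_append] at hcanon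
        rw [hcanon]
        have ht : (y :: r').takeWhile (fun l => !pvBnd l) = [] := by
          simp [hy]
        have hd : (y :: r').dropWhile (fun l => !pvBnd l) = y :: r' := by
          simp [hy]
        rw [ht, hd, List.append_nil]
      · -- all pair components are nonnegative
        intro q hq
        obtain ⟨hq1, hq2⟩ := List.of_mem_zip hq
        constructor
        · rcases List.mem_cons.mp hq1 with h | h
          · omega
          · obtain ⟨j, hj, hjq⟩ := List.mem_map.mp h
            have := pvBIdxs_nonneg r' j hj
            omega
        · rcases List.mem_append.mp hq2 with h | h
          · obtain ⟨j, hj, hjq⟩ := List.mem_map.mp h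
            have := pvBIdxs_nonneg r' j hj
            omega
          · simp only [List.mem_singleton] at h
            rw [h]
            positivity
    | false =>
      -- y continues the pending block
      have hb : pvBIdxs (y :: r') = (pvBIdxs r').map (· + 1) := by
        simp [pvBIdxs, hy]
      rw [hb, pvMap_add_add]
      have harr : (1 : Int) + (blk.length : Int) = ((blk ++ [y]).length : Int) := by
        simp
        omega
      have hlast : ((blk.length : Int) + ((y :: r').length : Int))
          = (((blk ++ [y]).length : Int) + (r'.length : Int)) := by
        simp
        omega
      rw [harr, hlast, List.append_cons]
      rw [ihr (blk ++ [y]) hlen']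
      have ht : (y :: r').takeWhile (fun l => !pvBnd l) = y :: r'.takeWhile (fun l => !pvBnd l) := by
        simp [hy]
      have hd : (y :: r').dropWhile (fun l => !pvBnd l) = r'.dropWhile (fun l => !pvBnd l) := by
        simp [hy]
      rw [ht, hd]
      congr 1
      simp

lemma pvChar (xs : List String) :
    pvProcBlocks xs (List.zip ((0 : Int) :: pvBIdxs xs) (pvBIdxs xs ++ [(xs.length : Int)]))
      = pvBlockRec xs := by
  have H : ∀ (n : Nat) (ys : List String), ys.length ≤ n →
      pvProcBlocks ys (List.zip ((0 : Int) :: pvBIdxs ys) (pvBIdxs ys ++ [(ys.length : Int)]))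
        = pvBlockRec ys := by
    intro n
    induction n with
    | zero =>
      intro ys hys
      have : ys = [] := List.length_eq_zero_iff.mp (Nat.le_zero.mp hys)
      subst this
      simp only [pvBIdxs, List.length_nil, Nat.cast_zero, List.nil_append, List.zip_cons_cons,
        List.zip_nil_left]
      rw [pvProcBlocks, pvSlice_zero_zero, pvProcessBlock, pvProcBlocks]
      simp [pvBlockRec]
    | succ n ih =>
      intro ys hys
      match ys with
      | [] =>
        simp only [pvBIdxs, List.length_nil, Nat.cast_zero, List.nil_append, List.zip_cons_cons,
          List.zip_nil_left]
        rw [pvProcBlocks, pvSlice_zero_zero, pvProcessBlock, pvProcBlocks]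
        simp [pvBlockRec]
      | x :: r =>
        have hlr : r.length ≤ n := by
          simp only [List.length_cons] at hys
          omega
        have haux := pvCharAux n ih r [x] hlr
        have hone : (([x] : List String).length : Int) = 1 := by simp
        rw [hone] at haux
        have hpb : pvBlockRec (x :: r) = pvProcessBlock (x :: r.takeWhile (fun l => !pvBnd l)) ++
            pvBlockRec (r.dropWhile (fun l => !pvBnd l)) := by
          rw [pvBlockRec]
        have hsingle : ([x] : List String) ++ r.takeWhile (fun l => !pvBnd l)
            = x :: r.takeWhile (fun l => !pvBnd l) := by simp
        have hsingle2 : ([x] : List String) ++ r = x :: r := by simp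
        rw [hsingle, hsingle2] at haux
        have hlen2 : (((x :: r).length : Nat) : Int) = 1 + (r.length : Int) := by
          simp only [List.length_cons]
          push_cast
          ring
        cases hx : pvBnd x with
        | true =>
          have hb : pvBIdxs (x :: r) = (0 : Int) :: (pvBIdxs r).map (· + 1) := by
            simp [pvBIdxs, hx]
          rw [hb]
          simp only [List.cons_append, List.zip_cons_cons]
          rw [pvProcBlocks, pvSlice_zero_zero, pvProcessBlock, List.nil_append, hlen2, haux, hpb]
        | false =>
          have hb : pvBIdxs (x :: r) = (pvBIdxs r).map (· + 1) := by
            simp [pvBIdxs, hx]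
          rw [hb, hlen2, haux, hpb]
  exact H xs.length xs le_rfl

-- ---- main equivalence ----

lemma pvGo (n : Nat)
    (E : ∀ (lines : List String) (d : Int) (p : String),
      lines.length ≤ n → lines ≠ [] → 0 ≤ d →
      (∀ l ∈ lines, pvNb l = true ∧ d ≤ pvWs l) →
      pvEmit (pvMinFst (lines.map (fun l => (pvWs l, l)))) (lines.map (fun l => (pvWs l, l))) p
        = (process_prefix_sharing_lines (lines.map (pvDd d))).map (fun s => p ++ s))
    (M : Int) (hM : 0 ≤ M) :
    ∀ (k : Nat) (sub : List String) (p : String), sub.length ≤ k → sub.length ≤ n + 1 →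
      (∀ l ∈ sub, pvNb l = true ∧ M ≤ pvWs l) →
      pvEmit M (sub.map (fun l => (pvWs l, l))) p
        = (pvBlockRec (sub.map (pvDd M))).map (fun s => p ++ s) := by
  intro k
  induction k with
  | zero =>
    intro sub p h0 _ _
    have : sub = [] := List.length_eq_zero_iff.mp (Nat.le_zero.mp h0)
    subst this
    simp [pvEmit, pvBlockRec]
  | succ k ihk =>
    intro sub p hk hn hprops
    match sub with
    | [] => simp [pvEmit, pvBlockRec]
    | l0 :: rsub =>
      have hrsub : ∀ l ∈ rsub, pvNb l = true ∧ M ≤ pvWs l :=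
        fun l hl => hprops l (List.mem_cons_of_mem _ hl)
      -- the continuation test agrees with the boundary test on the dedented line
      have htw : (rsub.map (fun l => (pvWs l, l))).takeWhile (pvCont M)
          = (rsub.takeWhile (fun l => !pvBnd (pvDd M l))).map (fun l => (pvWs l, l)) := by
        rw [List.takeWhile_map]
        congr 1
        apply pvTakeWhile_congr
        intro l hl
        simpa using pvCont_iff M l hM (hrsub l hl).1 (hrsub l hl).2
      have hdw : (rsub.map (fun l => (pvWs l, l))).dropWhile (pvCont M)
          = (rsub.dropWhile (fun l => !pvBnd (pvDd M l))).map (fun l => (pvWs l, l)) := by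
        rw [List.dropWhile_map]
        congr 1
        apply pvDropWhile_congr
        intro l hl
        simpa using pvCont_iff M l hM (hrsub l hl).1 (hrsub l hl).2
      have hAtw : (rsub.map (pvDd M)).takeWhile (fun l => !pvBnd l)
          = (rsub.takeWhile (fun l => !pvBnd (pvDd M l))).map (pvDd M) := by
        rw [List.takeWhile_map]
        rfl
      have hAdw : (rsub.map (pvDd M)).dropWhile (fun l => !pvBnd l)
          = (rsub.dropWhile (fun l => !pvBnd (pvDd M l))).map (pvDd M) := by
        rw [List.dropWhile_map]
        rfl
      have hlen1 : (rsub.takeWhile (fun l => !pvBnd (pvDd M l))).length ≤ rsub.length :=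
        (List.takeWhile_sublist _).length_le
      have hlen2 : (rsub.dropWhile (fun l => !pvBnd (pvDd M l))).length ≤ rsub.length :=
        List.length_dropWhile_le _ _
      have hsub1 : ∀ l ∈ rsub.takeWhile (fun l => !pvBnd (pvDd M l)), l ∈ rsub :=
        fun l hl => (List.takeWhile_sublist _).subset hl
      have hsub2 : ∀ l ∈ rsub.dropWhile (fun l => !pvBnd (pvDd M l)), l ∈ rsub :=
        fun l hl => (List.dropWhile_sublist _).subset hl
      have hklen : rsub.length ≤ k := by
        simp only [List.length_cons] at hk
        omega
      have hnlen : rsub.length ≤ n := by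
        simp only [List.length_cons] at hn
        omega
      have hrest := ihk (rsub.dropWhile (fun l => !pvBnd (pvDd M l))) p
        (le_trans hlen2 hklen) (le_trans hlen2 (le_trans hnlen (Nat.le_succ n)))
        (fun l hl => hrsub l (hsub2 l hl))
      rw [List.map_cons, pvEmit]
      simp only [htw, hdw]
      rw [List.map_cons, pvBlockRec, hAtw, hAdw, List.map_append, ← hrest]
      cases htl : rsub.takeWhile (fun l => !pvBnd (pvDd M l)) with
      | nil =>
        simp only [List.map_nil]
        rw [pvProcessBlock]
        simp only [List.map_cons, List.map_nil]
        rfl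
      | cons h1 t1 =>
        simp only [List.map_cons]
        have hE := E (h1 :: t1) M (p ++ PySem.Str.rstrip (PySem.Str.slice l0 (some M) none) ++ " ")
          (by
            have := hlen1
            rw [htl] at this
            omega)
          (by simp) hM
          (fun l hl => by
            have hl' : l ∈ rsub := hsub1 l (by rw [htl]; exact hl)
            exact hrsub l hl')
        rw [List.map_cons] at hE
        rw [hE]
        rw [pvProcessBlock]
        simp only [List.map_cons, List.map_map]
        congr 1
        apply List.map_congr_left
        intro s _
        simp only [Function.comp_apply, pvDd]
        rw [String.append_assoc, String.append_assoc, String.append_assoc]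

lemma pvMain (n : Nat) : ∀ (lines : List String) (d : Int) (p : String),
    lines.length ≤ n → lines ≠ [] → 0 ≤ d →
    (∀ l ∈ lines, pvNb l = true ∧ d ≤ pvWs l) →
    pvEmit (pvMinFst (lines.map (fun l => (pvWs l, l)))) (lines.map (fun l => (pvWs l, l))) p
      = (process_prefix_sharing_lines (lines.map (pvDd d))).map (fun s => p ++ s) := by
  induction n with
  | zero =>
    intro lines d p hlen hne _ _
    exact absurd (List.length_eq_zero_iff.mp (Nat.le_zero.mp hlen)) hne
  | succ n ihE =>
    intro lines d p hlen hne hd hall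
    cases hmin : PySem.List.min? (lines.map pvWs) (fun x => x) with
    | none =>
      rw [PySem.List.min?_eq_none_iff] at hmin
      exact absurd (List.map_eq_nil_iff.mp hmin) hne
    | some M =>
      have hMmem : M ∈ lines.map pvWs := PySem.List.min?_mem hmin
      have hMmin : ∀ l ∈ lines, M ≤ pvWs l := fun l hl =>
        PySem.List.min?_isMin hmin (pvWs l) (List.mem_map_of_mem hl)
      have hdM : d ≤ M := by
        obtain ⟨l₀, hl₀, hl₀M⟩ := List.mem_map.mp hMmem
        rw [← hl₀M]
        exact (hall l₀ hl₀).2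
      have hM0 : (0 : Int) ≤ M := le_trans hd hdM
      rw [pvMinFst_eq lines M hMmem hMmin]
      rw [pvGo n ihE M hM0 lines.length lines p le_rfl (by omega)
        (fun l hl => ⟨(hall l hl).1, hMmin l hl⟩)]
      suffices hA : process_prefix_sharing_lines (lines.map (pvDd d))
          = pvBlockRec (lines.map (pvDd M)) by rw [hA]
      obtain ⟨x, xs, hxs⟩ : ∃ x xs, lines.map (pvDd d) = x :: xs := by
        cases hl : lines.map (pvDd d) with
        | nil => exact absurd (List.map_eq_nil_iff.mp hl) hne
        | cons a b => exact ⟨a, b, rfl⟩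
      rw [hxs]
      rw [process_prefix_sharing_lines]
      rw [← hxs]
      have hmi : pvMinIndent (lines.map (pvDd d)) = M - d :=
        pvMinIndent_dd lines d hd M hne hall hMmem hMmin
      rw [hmi]
      have hfil : (lines.map (pvDd d)).filter pvNb = lines.map (pvDd d) := by
        rw [List.filter_eq_self]
        intro l hl
        obtain ⟨l', hl', rfl⟩ := List.mem_map.mp hl
        exact pvNb_pvDd d l' hd (hall l' hl').1 (hall l' hl').2
      rw [hfil]
      have hdd : (lines.map (pvDd d)).map (fun l => PySem.Str.slice l (some (M - d)) none)
          = lines.map (pvDd M) := by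
        rw [List.map_map]
        apply List.map_congr_left
        intro l hl
        show pvDd (M - d) (pvDd d l) = pvDd M l
        rw [pvDd_pvDd d (M - d) hd (by omega)]
        congr 1
        omega
      rw [hdd, pvIdxs_eq, PySem.List.len_eq]
      exact pvChar (lines.map (pvDd M))

lemma pvProcess_filter (lines : List String) :
    process_prefix_sharing_lines lines = process_prefix_sharing_lines (lines.filter pvNb) := by
  cases lines with
  | nil => rfl
  | cons a as =>
    cases hf : (a :: as).filter pvNb with
    | nil =>
      rw [show process_prefix_sharing_lines ([] : List String) = [] from by
        rw [process_prefix_sharing_lines]]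
      rw [process_prefix_sharing_lines]
      have hmap : ((a :: as).filter pvNb).map
          (fun l => PySem.Str.slice l (some (pvMinIndent (a :: as))) none) = [] := by
        rw [hf]
        rfl
      rw [hmap]
      have hidx : pvIdxs ([] : List String) = [] := rfl
      rw [hidx]
      have hlen0 : PySem.List.len ([] : List String) = 0 := rfl
      rw [hlen0]
      show pvProcBlocks [] (List.zip [(0 : Int)] [(0 : Int)]) = []
      rw [show List.zip [(0 : Int)] [(0 : Int)] = [((0 : Int), (0 : Int))] from rfl]
      rw [pvProcBlocks, pvSlice_zero_zero, pvProcessBlock, pvProcBlocks]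
      rfl
    | cons b bs =>
      have hff : ((a :: as).filter pvNb).filter pvNb = (a :: as).filter pvNb := by
        rw [List.filter_eq_self]
        intro x hx
        exact (List.mem_filter.mp hx).2
      have hmi2 : pvMinIndent ((a :: as).filter pvNb) = pvMinIndent (a :: as) := by
        unfold pvMinIndent
        rw [hff]
      rw [process_prefix_sharing_lines, hf, process_prefix_sharing_lines, ← hf, hff, hmi2]

-- ===== VERDICT (by name: the statement is the Claim_ definition above) =====
theorem process_prefix_sharing_lines_spec : Claim_equal_process_prefix_sharing_lines := by
  intro lines _
  unfold Spec_process_prefix_sharing_lines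
  rw [pvProcess_filter lines]
  unfold process_prefix_sharing_lines_alt
  cases hf : lines.filter pvNb with
  | nil =>
    show process_prefix_sharing_lines [] = _
    rw [process_prefix_sharing_lines]
    rfl
  | cons b bs =>
    have hprops : ∀ l ∈ b :: bs, pvNb l = true ∧ (0 : Int) ≤ pvWs l := by
      intro l hl
      rw [← hf] at hl
      refine ⟨(List.mem_filter.mp hl).2, ?_⟩
      rw [pvWs_eq]
      positivity
    have hmain := pvMain (b :: bs).length (b :: bs) 0 "" le_rfl (by simp) le_rfl hprops
    have hdd0 : (b :: bs).map (pvDd 0) = b :: bs := by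
      have : (b :: bs).map (pvDd 0) = (b :: bs).map id := by
        apply List.map_congr_left
        intro l _
        exact pvDd_zero l
      rw [this, List.map_id]
    rw [hdd0] at hmain
    have hid : (process_prefix_sharing_lines (b :: bs)).map (fun s => "" ++ s)
        = process_prefix_sharing_lines (b :: bs) := by
      have : (process_prefix_sharing_lines (b :: bs)).map (fun s => "" ++ s)
          = (process_prefix_sharing_lines (b :: bs)).map id := by
        apply List.map_congr_left
        intro s _
        exact String.empty_append
      rw [this, List.map_id]
    rw [hid] at hmain
    rw [← hmain]
    rfl
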